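-- pv_equiv track=rewrite | github.com/simonchuth/seq_listing_patent_tool | src/output.py | add_amino_acid
-- ===== SOURCE A (Python) =====
-- def add_aa_list(output_str, segment_aa_list, aa_count):
--     # amino acid line
--     aa_line_output = ' '.join(segment_aa_list)
--     output_str = add_line(output_str,
--                           aa_line_output,
--                           num_id=None,
--                           num_blank_lines=0)
--
--     # amino acid position line
--     aa_count_line_output = ''
--     for i, aa in enumerate(segment_aa_list):
--         aa_count += 1
--         if (aa_count == 1) or (aa_count % 5 == 0):
--             str_aa_count = str(aa_count)
--             pad_len = 3 - len(str_aa_count)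
--             pad = ' ' * pad_len
--             aa_count_line_output += pad + str_aa_count + ' '
--         else:
--             aa_count_line_output += ' ' * 4
--     output_str = add_line(output_str,
--                           aa_count_line_output,
--                           num_id=None,
--                           num_blank_lines=1)
--
--     return output_str, aa_count
--
-- def add_amino_acid(display_idx, aa_3char_seq, output_str):
--     aa_list = aa_3char_seq.split(' ')
--     chunk_aa_list = [aa_list[x:x + 16] for x in range(0, len(aa_list), 16)]
--
--     aa_count = 0
--     for i, aa_chunk in enumerate(chunk_aa_list):
--         output_str, aa_count = add_aa_list(output_str,
--                                            aa_chunk,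
--                                            aa_count)
--
--     return output_str
--
-- def add_line(output_str, content, num_id=None, num_blank_lines=0):
--     line_str = ''
--
--     if not isinstance(content, str):
--         content = str(content)
--
--     if num_id is not None:
--         line_str = line_str + f'<{num_id}>  '
--
--     line_str = line_str + content + ' \n'
--
--     # Add blank lines
--     line_str = line_str + ' \n' * num_blank_lines
--     output_str = output_str + line_str
--
--     return output_str
-- ===== SOURCE B (Python) =====
-- def add_amino_acid(display_idx, aa_3char_seq, output_str):
--     aa_list = aa_3char_seq.split(' ')
--
--     # one pass: a label field per amino acid, derived from its global 1-based position
--     labels = []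
--     for i in range(len(aa_list)):
--         n = i + 1
--         if n == 1 or n % 5 == 0:
--             s = str(n)
--             labels.append(' ' * (3 - len(s)) + s + ' ')
--         else:
--             labels.append('    ')
--
--     # consume both lists 16 at a time, emitting the two lines per chunk
--     parts = []
--     while aa_list:
--         parts.append(' '.join(aa_list[:16]) + ' \n')
--         parts.append(''.join(labels[:16]) + ' \n \n')
--         aa_list = aa_list[16:]
--         labels = labels[16:]
--     return output_str + ''.join(parts)
-- ===== Notes on version B (the rewrite author's own statement) =====
-- stated objective: alternative
-- what changed: Replaces the stateful chunk loop threading a mutable aa_count through add_aa_list with a two-phase scheme: one pass builds a parallel list of label fields from each global index, then a loop consumes the amino-acid and label lists 16 at a time and joins all emitted lines at the end instead of repeated string concatenation.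
import Mathlib
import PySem

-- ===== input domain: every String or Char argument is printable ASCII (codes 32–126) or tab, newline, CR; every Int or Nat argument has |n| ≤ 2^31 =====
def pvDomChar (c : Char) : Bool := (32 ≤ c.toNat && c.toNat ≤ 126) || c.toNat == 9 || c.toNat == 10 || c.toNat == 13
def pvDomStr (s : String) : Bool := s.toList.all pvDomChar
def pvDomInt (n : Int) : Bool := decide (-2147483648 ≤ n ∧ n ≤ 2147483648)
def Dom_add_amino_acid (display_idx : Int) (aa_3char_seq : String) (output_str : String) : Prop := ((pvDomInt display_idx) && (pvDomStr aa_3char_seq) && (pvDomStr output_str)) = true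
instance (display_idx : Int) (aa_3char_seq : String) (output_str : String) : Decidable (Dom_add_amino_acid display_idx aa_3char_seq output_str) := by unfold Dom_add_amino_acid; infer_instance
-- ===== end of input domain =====

-- B replaces A's chunk loop threading a mutable aa_count through add_aa_list with a two-phase
-- scheme: one pass builds a parallel list of position labels from global indices, then a loop
-- consumes the amino-acid and label lists 16 at a time (objective: alternative decomposition).
-- Both ports work on List Char internally (String.toList / String.ofList at the boundary), exact.

-- ===== PORT A =====
-- add_line: num_id is None and content a str at every call in this module; the f-string branch
-- and ' \n' * num_blank_lines are ported exactly
def pvA_add_line (output_str : List Char) (content : List Char) (num_id : Option Int) (num_blank_lines : Nat) : List Char :=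
  let line_str : List Char := []
  let line_str := match num_id with
    | some nid => line_str ++ ('<' :: (PySem.Int.toStr nid).toList ++ ['>', ' ', ' '])
    | none => line_str
  let line_str := line_str ++ content ++ [' ', '\n']
  let line_str := line_str ++ (List.replicate num_blank_lines [' ', '\n']).flatten
  output_str ++ line_str

def pvA_add_aa_list (output_str : List Char) (segment_aa_list : List (List Char)) (aa_count : Int) : (List Char) × Int :=
  let aa_line_output := PySem.Chars.join [' '] segment_aa_list
  let output_str := pvA_add_line output_str aa_line_output none 0
  -- for i, aa in enumerate(segment_aa_list): aa_count += 1; append the padded count or 4 blanks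
  -- (the Python locals str_aa_count / pad_len / pad are inlined; ' ' * pad_len with a negative
  -- pad_len is '' in Python, matched by Int.toNat clamping)
  let st := segment_aa_list.foldl (fun (st : (List Char) × Int) (_aa : List Char) =>
      if st.2 + 1 == 1 || PySem.Int.mod (st.2 + 1) 5 == 0 then
        (st.1 ++ (List.replicate ((3 : Int) - (((PySem.Int.toStr (st.2 + 1)).toList.length : Int))).toNat ' '
            ++ (PySem.Int.toStr (st.2 + 1)).toList ++ [' ']), st.2 + 1)
      else
        (st.1 ++ List.replicate 4 ' ', st.2 + 1)) ([], aa_count)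
  let output_str := pvA_add_line output_str st.1 none 1
  (output_str, st.2)

def add_amino_acid (display_idx : Int) (aa_3char_seq : String) (output_str : String) : String :=
  let aa_list := PySem.Chars.splitOn aa_3char_seq.toList [' ']   -- aa_3char_seq.split(' '), sep ≠ '' so total
  let chunk_aa_list := (PySem.List.pyRange 0 (aa_list.length : Int) 16).map
      (fun x => PySem.List.slice aa_list (some x) (some (x + 16)))
  let st := chunk_aa_list.foldl (fun (st : (List Char) × Int) aa_chunk =>
      pvA_add_aa_list st.1 aa_chunk st.2) (output_str.toList, 0)
  String.ofList st.1

-- ===== PORT B =====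
-- label field for the amino acid at global 0-based index i (n = i + 1; str(n) inlined)
def pvB_label (i : Nat) : List Char :=
  if (i : Int) + 1 == 1 || PySem.Int.mod ((i : Int) + 1) 5 == 0 then
    List.replicate ((3 : Int) - (((PySem.Int.toStr ((i : Int) + 1)).toList.length : Int))).toNat ' '
      ++ (PySem.Int.toStr ((i : Int) + 1)).toList ++ [' ']
  else
    List.replicate 4 ' '

-- while aa_list: emit the two lines for the first 16 entries, then drop 16 from both lists
def pvB_emit : List (List Char) → List (List Char) → List Char
  | [], _labels => []
  | aa :: rest, labels =>
      PySem.Chars.join [' '] ((aa :: rest).take 16) ++ [' ', '\n']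
      ++ (labels.take 16).flatten ++ [' ', '\n', ' ', '\n']
      ++ pvB_emit ((aa :: rest).drop 16) (labels.drop 16)
termination_by l _ => l.length
decreasing_by simp [List.length_drop]

def add_amino_acid_alt (display_idx : Int) (aa_3char_seq : String) (output_str : String) : String :=
  let aa_list := PySem.Chars.splitOn aa_3char_seq.toList [' ']
  let labels := (List.range aa_list.length).map pvB_label
  String.ofList (output_str.toList ++ pvB_emit aa_list labels)

-- ===== PRECONDITION & SPEC =====
def Spec_add_amino_acid (display_idx : Int) (aa_3char_seq : String) (output_str : String) (out : String) : Prop := out = add_amino_acid_alt display_idx aa_3char_seq output_str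
instance (display_idx : Int) (aa_3char_seq : String) (output_str : String) (out : String) : Decidable (Spec_add_amino_acid display_idx aa_3char_seq output_str out) := by unfold Spec_add_amino_acid; infer_instance

-- ===== CLAIM (what is proved, stated in full; the proofs are below) =====
def Claim_equal_add_amino_acid : Prop := ∀ (display_idx : Int) (aa_3char_seq : String) (output_str : String), Dom_add_amino_acid display_idx aa_3char_seq output_str → Spec_add_amino_acid display_idx aa_3char_seq output_str (add_amino_acid display_idx aa_3char_seq output_str)

-- ===== LEMMAS AND PROOFS =====

-- recursive 16-chunking, the common shape both sides are reduced to
def pvChunk16 {α : Type} : List α → List (List α)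
  | [] => []
  | a :: rest => ((a :: rest).take 16) :: pvChunk16 ((a :: rest).drop 16)
termination_by l => l.length
decreasing_by simp [List.length_drop]

theorem pvChunks_aux {α : Type} (l : List α) :
    (List.range ((l.length + 15) / 16)).map (fun k => (l.drop (16 * k)).take 16) = pvChunk16 l := by
  induction l using pvChunk16.induct with
  | case1 => simp [pvChunk16]
  | case2 a rest ih =>
      have hM : ((a :: rest).length + 15) / 16 = (((a :: rest).drop 16).length + 15) / 16 + 1 := by
        simp only [List.length_drop, List.length_cons]
        omega
      rw [hM, List.range_succ_eq_map, List.map_cons, List.map_map]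
      have h2 : List.map ((fun k => ((a :: rest).drop (16 * k)).take 16) ∘ Nat.succ)
            (List.range ((((a :: rest).drop 16).length + 15) / 16))
          = List.map (fun k => (((a :: rest).drop 16).drop (16 * k)).take 16)
            (List.range ((((a :: rest).drop 16).length + 15) / 16)) := by
        apply List.map_congr_left
        intro k _
        simp only [Function.comp_apply, List.drop_drop]
        congr 2
        omega
      rw [h2, ih]
      simp [pvChunk16]

-- A's range-of-slices chunk list is the recursive chunking
theorem pvChunks_eq {α : Type} (l : List α) :
    (PySem.List.pyRange 0 (l.length : Int) 16).map
      (fun x => PySem.List.slice l (some x) (some (x + 16))) = pvChunk16 l := by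
  rw [PySem.List.pyRange_of_pos 0 (l.length : Int) (by norm_num : (0:Int) < 16), List.map_map]
  have hM : (if (0 : Int) < (l.length : Int) then (((l.length : Int) - 0 + 16 - 1) / 16).toNat else 0)
      = (l.length + 15) / 16 := by
    by_cases h : (0 : Int) < (l.length : Int)
    · rw [if_pos h]
      have h1 : ((l.length : Int) - 0 + 16 - 1) = ((l.length + 15 : Nat) : Int) := by push_cast; ring
      rw [h1, show (16 : Int) = ((16 : Nat) : Int) from rfl, ← Int.natCast_div, Int.toNat_natCast]
    · rw [if_neg h]
      have h0 : l.length = 0 := by omega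
      omega
  rw [hM, ← pvChunks_aux l]
  apply List.map_congr_left
  intro k _
  simp only [Function.comp_apply, zero_add]
  rw [show (16 : Int) * (k : Int) + 16 = ((16 * k : Nat) : Int) + ((16 : Nat) : Int) from by push_cast; ring,
      show (16 : Int) * (k : Int) = ((16 * k : Nat) : Int) from by push_cast; ring,
      PySem.List.slice_natCast_add]

-- the label text A appends for count value m (= B's label at index m-1)
def pvLab (m : Int) : List Char :=
  if m == 1 || PySem.Int.mod m 5 == 0 then
    List.replicate ((3 : Int) - (((PySem.Int.toStr m).toList.length : Int))).toNat ' '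
      ++ (PySem.Int.toStr m).toList ++ [' ']
  else
    List.replicate 4 ' '

theorem pvB_label_eq (i : Nat) : pvB_label i = pvLab ((i : Int) + 1) := rfl

theorem pvFlat_succ (x : Int) (n : Nat) :
    (List.map (fun (i : Nat) => pvLab (x + (i : Int))) (List.range (n + 1))).flatten
      = pvLab (x + ((0 : Nat) : Int)) ++ (List.map (fun (i : Nat) => pvLab (x + 1 + (i : Int))) (List.range n)).flatten := by
  rw [List.range_succ_eq_map, List.map_cons, List.map_map, List.flatten_cons]
  congr 1
  congr 1
  apply List.map_congr_left
  intro i _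
  simp only [Function.comp_apply]
  congr 1
  push_cast
  ring

-- A's inner count-line fold, characterised
theorem pvInner_eq (seg : List (List Char)) (st : (List Char) × Int) :
    seg.foldl (fun (st : (List Char) × Int) (_aa : List Char) =>
      if st.2 + 1 == 1 || PySem.Int.mod (st.2 + 1) 5 == 0 then
        (st.1 ++ (List.replicate ((3 : Int) - (((PySem.Int.toStr (st.2 + 1)).toList.length : Int))).toNat ' '
            ++ (PySem.Int.toStr (st.2 + 1)).toList ++ [' ']), st.2 + 1)
      else
        (st.1 ++ List.replicate 4 ' ', st.2 + 1)) st
    = (st.1 ++ (List.map (fun (i : Nat) => pvLab (st.2 + 1 + (i : Int))) (List.range seg.length)).flatten,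
       st.2 + (seg.length : Int)) := by
  induction seg generalizing st with
  | nil => simp
  | cons a rest ih =>
      have hstep : ∀ (t : (List Char) × Int),
          (if t.2 + 1 == 1 || PySem.Int.mod (t.2 + 1) 5 == 0 then
            (t.1 ++ (List.replicate ((3 : Int) - (((PySem.Int.toStr (t.2 + 1)).toList.length : Int))).toNat ' '
                ++ (PySem.Int.toStr (t.2 + 1)).toList ++ [' ']), t.2 + 1)
          else
            (t.1 ++ List.replicate 4 ' ', t.2 + 1))
          = (t.1 ++ pvLab (t.2 + 1), t.2 + 1) := by
        intro t
        by_cases hc : (t.2 + 1 == 1 || PySem.Int.mod (t.2 + 1) 5 == 0) = true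
        · simp only [pvLab]
          rw [if_pos hc, if_pos hc]
        · simp only [pvLab]
          rw [if_neg hc, if_neg hc]
      rw [List.foldl_cons, hstep, ih]
      simp only [List.length_cons]
      rw [pvFlat_succ (st.2 + 1) rest.length]
      simp only [Prod.mk.injEq]
      constructor
      · simp [List.append_assoc]
      · push_cast
        ring

-- one chunk step of A, fully expanded
theorem pvStep_eq (acc : List Char) (chunk : List (List Char)) (c : Int) :
    pvA_add_aa_list acc chunk c
      = (acc ++ PySem.Chars.join [' '] chunk ++ [' ', '\n']
          ++ (List.map (fun (i : Nat) => pvLab (c + 1 + (i : Int))) (List.range chunk.length)).flatten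
          ++ [' ', '\n', ' ', '\n'],
         c + (chunk.length : Int)) := by
  simp only [pvA_add_aa_list, pvA_add_line]
  rw [pvInner_eq]
  simp [List.append_assoc]

theorem pvLab_take (c n : Nat) :
    ((List.range n).map (fun i => pvB_label (c + i))).take 16
      = (List.range (min 16 n)).map (fun (i : Nat) => pvLab ((c : Int) + 1 + (i : Int))) := by
  rw [← List.map_take, List.take_range]
  apply List.map_congr_left
  intro i _
  rw [pvB_label_eq]
  congr 1
  push_cast
  ring

theorem pvLab_drop (c n : Nat) :
    ((List.range n).map (fun i => pvB_label (c + i))).drop 16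
      = (List.range (n - 16)).map (fun i => pvB_label (c + min 16 n + i)) := by
  by_cases h : 16 ≤ n
  · rw [Nat.min_eq_left h]
    have hn : n = 16 + (n - 16) := by omega
    conv_lhs => rw [hn, List.range_add, List.map_append]
    rw [List.drop_left' (by simp), List.map_map]
    apply List.map_congr_left
    intro i _
    simp only [Function.comp_apply]
    congr 1
    omega
  · have h1 : n - 16 = 0 := by omega
    have h2 : ((List.range n).map (fun i => pvB_label (c + i))).length ≤ 16 := by
      simp
      omega
    rw [List.drop_eq_nil_of_le h2, h1]
    simp

-- the main invariant: A's fold over the chunks, started at count c, is B's emission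
theorem pvEmit_eq (l : List (List Char)) (acc : List Char) (c : Nat) :
    ((pvChunk16 l).foldl (fun (st : (List Char) × Int) aa_chunk =>
        pvA_add_aa_list st.1 aa_chunk st.2) (acc, (c : Int))).1
      = acc ++ pvB_emit l ((List.range l.length).map (fun i => pvB_label (c + i))) := by
  induction l using pvChunk16.induct generalizing acc c with
  | case1 => simp [pvChunk16, pvB_emit]
  | case2 a rest ih =>
      simp only [pvChunk16]
      rw [List.foldl_cons, pvStep_eq]
      rw [show ((c : Int) + ((((a :: rest).take 16).length : Nat) : Int))
            = (((c + ((a :: rest).take 16).length : Nat)) : Int) from by push_cast; ring]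
      rw [ih]
      simp only [pvB_emit]
      simp only [List.length_cons, List.length_take, List.length_drop]
      rw [pvLab_take, pvLab_drop]
      simp [List.append_assoc]

-- ===== VERDICT (by name: the statement is the Claim_ definition above) =====
theorem add_amino_acid_spec : Claim_equal_add_amino_acid := by
  intro display_idx aa_3char_seq output_str _hDom
  unfold Spec_add_amino_acid
  simp only [add_amino_acid, add_amino_acid_alt]
  rw [pvChunks_eq]
  have h := pvEmit_eq (PySem.Chars.splitOn aa_3char_seq.toList [' ']) output_str.toList 0
  simp only [Nat.cast_zero, Nat.zero_add] at h
  rw [h]
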